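-- pv_equiv track=rewrite | github.com/benquick123/code-profiling | code/batch-2/dn6 - spet tviti/M-17151-2621.py | ves_tvit
-- ===== SOURCE A (Python) =====
-- def ves_tvit(diktionary):
--     new = {}
--     for a in diktionary:
--         key = a.split(' ', 1)[0].strip(":")
--         value = a.split(' ', 1)[1]
--         if key in new:
--             new[key].append(value)
--         else:
--             new[key] = [value]
--     return new
-- ===== SOURCE B (Python) =====
-- def ves_tvit(diktionary):
--     # One comprehension pass to compute (key, value) pairs, then a dict
--     # comprehension over the distinct keys (first-occurrence order), gathering
--     # each key's values by a filter. Same IndexError as A when a key has no space.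
--     pairs = [(a.split(' ', 1)[0].strip(':'), a.split(' ', 1)[1]) for a in diktionary]
--     return {k: [v for k2, v in pairs if k2 == k] for k in dict.fromkeys(k for k, _ in pairs)}
-- ===== Notes on version B (the rewrite author's own statement) =====
-- stated objective: alternative
-- what changed: Replaces A's single mutating pass with membership tests on a growing dict by a declarative two-phase version: map every string to its (key, value) pair, then build the result by a dict comprehension over the distinct keys (first-occurrence order), collecting each key's values with a filter.
import Mathlib
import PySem

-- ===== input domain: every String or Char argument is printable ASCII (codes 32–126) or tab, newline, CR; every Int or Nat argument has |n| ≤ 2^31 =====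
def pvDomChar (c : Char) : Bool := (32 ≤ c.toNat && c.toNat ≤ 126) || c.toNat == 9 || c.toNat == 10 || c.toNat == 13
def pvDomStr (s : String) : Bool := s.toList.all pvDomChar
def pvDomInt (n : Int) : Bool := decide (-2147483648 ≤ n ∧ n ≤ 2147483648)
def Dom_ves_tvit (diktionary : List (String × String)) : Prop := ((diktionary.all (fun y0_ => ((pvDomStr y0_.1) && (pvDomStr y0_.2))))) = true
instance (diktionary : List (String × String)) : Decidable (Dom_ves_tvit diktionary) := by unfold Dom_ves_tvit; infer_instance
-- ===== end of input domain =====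

-- B replaces A's single mutating pass (membership test + append into a growing dict)
-- by a declarative two-phase version: map each key string to its (token, rest) pair,
-- then a dict comprehension over the distinct tokens collecting values by a filter
-- (objective: alternative, not faster).  A iterates over the DICT's keys only.

-- ===== PORT A =====
def ves_tvit (diktionary : List (String × String)) : List (String × List String) :=
  (diktionary.foldl
    (fun (new : PySem.Dict String (List String)) a =>
      let parts := (PySem.Str.splitMax? a.1 " " 1).getD []
      let key := PySem.Str.stripChars ((PySem.List.pyGet? parts 0).getD "") ":"
      let value := (PySem.List.pyGet? parts 1).getD ""   -- Pre_ excludes the IndexError case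
      if new.contains key then new.modify key [] (fun vs => vs ++ [value])
      else new.insert key [value])
    PySem.Dict.empty).items

-- ===== PORT B =====
def ves_tvit_alt (diktionary : List (String × String)) : List (String × List String) :=
  let pairs := diktionary.map (fun a =>
      let parts := (PySem.Str.splitMax? a.1 " " 1).getD []
      (PySem.Str.stripChars ((PySem.List.pyGet? parts 0).getD "") ":",
       (PySem.List.pyGet? parts 1).getD ""))             -- Pre_ excludes the IndexError case
  (PySem.Set.ofList (pairs.map (fun p => p.1))).map
    (fun k => (k, (pairs.filter (fun p => p.1 == k)).map (fun p => p.2)))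

-- ===== PRECONDITION & SPEC =====
-- Pre_ excludes exactly the inputs where some dict key contains no space:
-- there `a.split(' ', 1)[1]` raises IndexError in A (and in B alike).
def Pre_ves_tvit (diktionary : List (String × String)) : Prop :=
  (diktionary.all (fun p => p.1.toList.any (fun c => c == ' '))) = true

instance (diktionary : List (String × String)) : Decidable (Pre_ves_tvit diktionary) := by
  unfold Pre_ves_tvit; infer_instance

def pvWitness_ves_tvit : (List (String × String)) := [("to: je", "x"), ("to ni", "y")]

def Spec_ves_tvit (diktionary : List (String × String)) (out : List (String × List String)) : Prop := out = ves_tvit_alt diktionary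
instance (diktionary : List (String × String)) (out : List (String × List String)) : Decidable (Spec_ves_tvit diktionary out) := by unfold Spec_ves_tvit; infer_instance

-- ===== CLAIM (what is proved, stated in full; the proofs are below) =====
def Claim_equal_ves_tvit : Prop := ∀ (diktionary : List (String × String)), Dom_ves_tvit diktionary → Pre_ves_tvit diktionary → Spec_ves_tvit diktionary (ves_tvit diktionary)

-- ===== LEMMAS AND PROOFS =====

-- A's loop body: when the key is absent, insert k [v] IS modify k [] (· ++ [v]).
theorem pv_stepA_eq (d : PySem.Dict String (List String)) (k : String) (v : String) :
    (if d.contains k then d.modify k [] (fun vs => vs ++ [v]) else d.insert k [v])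
      = d.modify k [] (fun vs => vs ++ [v]) := by
  by_cases h : d.contains k = true
  · simp [h]
  · have h' : d.contains k = false := by simpa using h
    simp [h', PySem.Dict.modify, PySem.Dict.getD_of_not_contains]

-- The grouping fold over explicit (key, value) pairs equals the comprehension form.
theorem pv_group_eq (pairs : List (String × String)) :
    ((pairs.foldl
        (fun (d : PySem.Dict String (List String)) p =>
          if d.contains p.1 then d.modify p.1 [] (fun vs => vs ++ [p.2])
          else d.insert p.1 [p.2]) PySem.Dict.empty).items)
      = (PySem.Set.ofList (pairs.map (fun p => p.1))).map
          (fun k => (k, (pairs.filter (fun p => p.1 == k)).map (fun p => p.2))) := by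
  have hstep : (fun (d : PySem.Dict String (List String)) (p : String × String) =>
      if d.contains p.1 then d.modify p.1 [] (fun vs => vs ++ [p.2]) else d.insert p.1 [p.2])
      = (fun d p => d.modify p.1 [] (fun vs => vs ++ [p.2])) :=
    funext fun d => funext fun p => pv_stepA_eq d p.1 p.2
  rw [hstep]
  have hnd : ((pairs.foldl (fun (d : PySem.Dict String (List String)) p =>
      d.modify p.1 [] (fun vs => vs ++ [p.2])) PySem.Dict.empty).keys).Nodup := by
    exact PySem.Dict.nodup_keys_foldl_modify_key pairs (fun p => p.1) []
      (fun _ p vs => vs ++ [p.2]) PySem.Dict.empty (by simp [PySem.Dict.keys_empty])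
  rw [PySem.Dict.items_eq_map_keys _ hnd []]
  rw [PySem.Dict.keys_foldl_modify_key pairs (fun p => p.1) [] (fun _ p vs => vs ++ [p.2])]
  rw [PySem.Dict.keys_empty, PySem.Set.update_nil_left]
  refine List.map_congr_left (fun k _ => ?_)
  rw [PySem.Dict.getD_foldl_modify_append]
  simp [PySem.Dict.getD_empty]

-- ===== VERDICT (by name: the statement is the Claim_ definition above) =====
theorem ves_tvit_spec : Claim_equal_ves_tvit := by
  intro d _ _
  have h := pv_group_eq (d.map (fun a =>
      let parts := (PySem.Str.splitMax? a.1 " " 1).getD []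
      (PySem.Str.stripChars ((PySem.List.pyGet? parts 0).getD "") ":",
       (PySem.List.pyGet? parts 1).getD "")))
  rw [List.foldl_map] at h
  exact h
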